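-- pv_equiv track=rewrite | github.com/hykilpikonna/CSC110 | assignments/a4/a4_part2.py | coprime_to_2_and_3
-- ===== SOURCE A (Python) =====
-- import math
--
-- def coprime_to_2_and_3(n: int) -> list[int]:
--     """Return the natural numbers less than n that are coprime to both 2 and 3.
--
--     The returned list is sorted.
--
--     Preconditions:
--       - n >= 6
--
--     >>> coprime_to_2_and_3(20)
--     [1, 5, 7, 11, 13, 17, 19]
--
--     Implementation note: recall negative list indexing from Assignment 3.
--     For all lists lst and integers i between 0 and len(lst) - 1 inclusive,
--     lst[-i] == lst[len(lst) - i].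
--     """
--     nums_so_far = [1, 5]
--     while nums_so_far[-2] + 6 < n:
--         # Note: Write four assert statements here expressing the four loop invariants from the
--         # assignment handout. These statements should be at the top of the loop body.
--
--         # Loop Invariant 1: every number k in nums_so_far is coprime to 2 and coprime to 3.
--         assert all(math.gcd(k, 2) == 1 and math.gcd(k, 3) == 1 for k in nums_so_far)
--         # Loop Invariant 2: for all natural numbers i between 0 and len(nums_so_far) - 3 inclusive,
--         #   nums_so_far[i] + 6 == nums_so_far[i + 2].
--         assert all(nums_so_far[i] + 6 == nums_so_far[i + 2] for i in range(len(nums_so_far) - 2))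
--         # Loop Invariant 3: for all natural numbers i between 0 and len(nums_so_far) - 2 inclusive,
--         #   nums_so_far[i] < nums_so_far[i + 1] (this means that nums_so_far is always sorted).
--         assert all(nums_so_far[i] < nums_so_far[i + 1] for i in range(len(nums_so_far) - 1))
--         # Loop Invariant 4: for all natural numbers k between 0 and nums_so_far[-1] inclusive,
--         #   if k is coprime to 2 and coprime to 3, then k in nums_so_far.
--         assert all(k in nums_so_far for k in range(nums_so_far[-1] + 1)
--                    if math.gcd(k, 2) == 1 and math.gcd(k, 3) == 1)
--
--         next_number = nums_so_far[-2] + 6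
--         list.append(nums_so_far, next_number)
--
--     return nums_so_far
-- ===== SOURCE B (Python) =====
-- def coprime_to_2_and_3(n: int) -> list[int]:
--     """Return the natural numbers less than n that are coprime to both 2 and 3.
--
--     The numbers coprime to 2 and 3 are exactly those congruent to 1 or 5 mod 6;
--     1 and 5 are the two below 7, and the rest are filtered from range(7, n).
--     """
--     return [1, 5] + [k for k in range(7, n) if k % 6 in (1, 5)]
-- ===== Notes on version B (the rewrite author's own statement) =====
-- stated objective: faster
-- what changed: Replaces A's while-loop additive recurrence (appending nums_so_far[-2]+6 with back-indexing, re-checking four invariant asserts that rescan the whole list every iteration) with a direct modular filter: [1,5] plus the k in range(7,n) with k % 6 in (1,5).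
import Mathlib
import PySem

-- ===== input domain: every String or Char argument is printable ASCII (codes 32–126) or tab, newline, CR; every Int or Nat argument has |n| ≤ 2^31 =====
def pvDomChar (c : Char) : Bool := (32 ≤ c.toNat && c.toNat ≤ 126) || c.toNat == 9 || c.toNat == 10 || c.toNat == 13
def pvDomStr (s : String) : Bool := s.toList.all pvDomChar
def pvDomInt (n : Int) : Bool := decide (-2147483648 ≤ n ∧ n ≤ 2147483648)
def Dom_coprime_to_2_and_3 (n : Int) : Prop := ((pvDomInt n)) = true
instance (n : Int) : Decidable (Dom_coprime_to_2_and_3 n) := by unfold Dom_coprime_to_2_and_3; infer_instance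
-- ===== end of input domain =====

-- B replaces A's [-2]+6 additive recurrence (with its per-iteration invariant asserts) by a
-- direct modular filter of range(7, n) prefixed with [1, 5]; a timing run reports it faster.

-- ===== PORT A =====
-- The while loop: state is the list nums_so_far; the asserts always hold and do not affect the
-- value, so they are not modelled. Fuel only makes the recursion total; it is never exhausted
-- (each iteration strictly increases nums_so_far[-2], which is bounded by n).
def coprime_to_2_and_3_loop (n : Int) : Nat → List Int → List Int
  | 0, lst => lst
  | fuel + 1, lst =>
    match PySem.List.pyGet? lst (-2) with
    | none => lst  -- unreachable: the list always has ≥ 2 elements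
    | some x =>
      if x + 6 < n then
        coprime_to_2_and_3_loop n fuel (lst ++ [x + 6])  -- next_number = nums_so_far[-2] + 6; append
      else lst

def coprime_to_2_and_3 (n : Int) : List Int :=
  coprime_to_2_and_3_loop n (n.toNat + 2) [1, 5]

-- ===== PORT B =====
def coprime_to_2_and_3_alt (n : Int) : List Int :=
  [1, 5] ++ (PySem.List.pyRange 7 n 1).filter
    (fun k => PySem.Int.mod k 6 == 1 || PySem.Int.mod k 6 == 5)

-- ===== PRECONDITION & SPEC =====
def Spec_coprime_to_2_and_3 (n : Int) (out : List Int) : Prop := out = coprime_to_2_and_3_alt n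
instance (n : Int) (out : List Int) : Decidable (Spec_coprime_to_2_and_3 n out) := by unfold Spec_coprime_to_2_and_3; infer_instance

-- ===== CLAIM (what is proved, stated in full; the proofs are below) =====
def Claim_equal_coprime_to_2_and_3 : Prop := ∀ (n : Int), Dom_coprime_to_2_and_3 n → Spec_coprime_to_2_and_3 n (coprime_to_2_and_3 n)

-- ===== LEMMAS AND PROOFS =====

-- nums_so_far[-2] of a list ending in [x, y]
theorem pvGet_neg2 (L : List Int) (x y : Int) :
    PySem.List.pyGet? (L ++ [x, y]) (-2) = some x := by
  have := PySem.List.pyGet?_neg_natCast (xs := L ++ [x, y]) (k := 2) (by omega)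
    (by simp)
  simpa using this

-- the filter predicate of B
theorem pvGood_iff (k : Int) :
    ((PySem.Int.mod k 6 == 1 || PySem.Int.mod k 6 == 5) = true) ↔ (k % 6 = 1 ∨ k % 6 = 5) := by
  rw [PySem.Int.mod_eq_emod_of_pos (by omega)]
  simp

-- a stretch of range containing no number ≡ 1 or 5 (mod 6) filters to []
theorem pvFilter_nil (a b : Int) (h : ∀ k, a ≤ k → k < b → ¬ (k % 6 = 1 ∨ k % 6 = 5)) :
    (PySem.List.pyRange a b 1).filter
      (fun k => PySem.Int.mod k 6 == 1 || PySem.Int.mod k 6 == 5) = [] := by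
  rw [List.filter_eq_nil_iff]
  intro k hk
  rw [PySem.List.mem_pyRange_one] at hk
  intro hg
  exact h k hk.1 hk.2 ((pvGood_iff k).mp hg)

-- loop invariant: the list ends in [x, y] where (x, y) are two consecutive members of the
-- 1,5,7,11,13,… progression; the loop appends exactly the filtered range above y
theorem pvLoop_eq (n : Int) : ∀ (fuel : Nat) (x y : Int) (L : List Int),
    ((x % 6 = 1 ∧ y = x + 4) ∨ (x % 6 = 5 ∧ y = x + 2)) →
    (n - x).toNat ≤ fuel →
    coprime_to_2_and_3_loop n fuel (L ++ [x, y]) =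
      L ++ [x, y] ++ (PySem.List.pyRange (y + 1) n 1).filter
        (fun k => PySem.Int.mod k 6 == 1 || PySem.Int.mod k 6 == 5) := by
  intro fuel
  induction fuel with
  | zero =>
    intro x y L hinv hfuel
    have hxy : x < y := by rcases hinv with ⟨_, h⟩ | ⟨_, h⟩ <;> omega
    have hn : n ≤ x := by omega
    simp [coprime_to_2_and_3_loop, PySem.List.pyRange_one_eq_nil (by omega : n ≤ y + 1)]
  | succ fuel ih =>
    intro x y L hinv hfuel
    simp only [coprime_to_2_and_3_loop, pvGet_neg2]
    by_cases hc : x + 6 < n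
    · rw [if_pos hc]
      have hxy : x < y ∧ y < x + 6 := by rcases hinv with ⟨_, h⟩ | ⟨_, h⟩ <;> omega
      have hstep : L ++ [x, y] ++ [x + 6] = (L ++ [x]) ++ [y, x + 6] := by simp
      rw [hstep, ih y (x + 6) (L ++ [x])
        (by rcases hinv with ⟨h1, h2⟩ | ⟨h1, h2⟩
            · right; constructor <;> omega
            · left; constructor <;> omega)
        (by omega)]
      -- split the range at x + 6: nothing good in [y+1, x+6), x+6 is good
      rw [PySem.List.pyRange_one_append (y + 1) (x + 6) n (by omega) (by omega),
          PySem.List.pyRange_one_cons (by omega : x + 6 < n),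
          List.filter_append]
      rw [pvFilter_nil (y + 1) (x + 6)
        (by intro k hk1 hk2 hg
            rcases hinv with ⟨h1, h2⟩ | ⟨h1, h2⟩ <;> omega)]
      have hgood : (fun k => PySem.Int.mod k 6 == 1 || PySem.Int.mod k 6 == 5) (x + 6) = true := by
        apply (pvGood_iff (x + 6)).mpr
        rcases hinv with ⟨h1, _⟩ | ⟨h1, _⟩
        · left; omega
        · right; omega
      simp only [List.filter_cons, hgood]
      simp
    · rw [if_neg hc]
      rw [pvFilter_nil (y + 1) n
        (by intro k hk1 hk2 hg
            rcases hinv with ⟨h1, h2⟩ | ⟨h1, h2⟩ <;> omega)]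
      simp

-- ===== VERDICT (by name: the statement is the Claim_ definition above) =====
theorem coprime_to_2_and_3_spec : Claim_equal_coprime_to_2_and_3 := by
  intro n _
  show coprime_to_2_and_3 n = coprime_to_2_and_3_alt n
  unfold coprime_to_2_and_3 coprime_to_2_and_3_alt
  have h := pvLoop_eq n (n.toNat + 2) 1 5 []
    (Or.inl (by norm_num)) (by omega)
  simp only [List.nil_append] at h
  rw [h]
  by_cases h6 : 6 < n
  · rw [PySem.List.pyRange_one_cons (by omega : (5:Int) + 1 < n)]
    have : (5:Int) + 1 = 6 := by norm_num
    rw [this]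
    simp only [List.filter_cons]
    norm_num [PySem.Int.mod]
  · rw [PySem.List.pyRange_one_eq_nil (by omega : n ≤ 5 + 1),
        PySem.List.pyRange_one_eq_nil (by omega : n ≤ 7)]
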